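-- pv_equiv track=rewrite | github.com/bohdan-natsevych/quote-attribution-training | data/data_augmentation.py | _get_word_positions
-- ===== SOURCE A (Python) =====
-- from typing import List, Dict, Tuple, Optional, Any
--
-- def _get_word_positions(text: str) -> Tuple[List[str], List[Tuple[int, int]]]:
--     """CURSOR: Return (words, [(start,end)]) for simple whitespace tokenization."""
--     words = text.split()
--     positions: List[Tuple[int, int]] = []
--     pos = 0
--     for word in words:
--         start = text.find(word, pos)
--         end = start + len(word)
--         positions.append((start, end))
--         pos = end
--     return words, positions
-- ===== SOURCE B (Python) =====
-- def _get_word_positions(text):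
--     """Single index-based scan: fuse tokenization and position finding in one pass."""
--     words = []
--     positions = []
--     i = 0
--     n = len(text)
--     while i < n:
--         if text[i].isspace():
--             i += 1
--             continue
--         start = i
--         while i < n and not text[i].isspace():
--             i += 1
--         words.append(text[start:i])
--         positions.append((start, i))
--     return words, positions
-- ===== Notes on version B (the rewrite author's own statement) =====
-- stated objective: simpler
-- what changed: Replaced split()-then-find() re-scanning with a single index-based scan that emits each word and its (start,end) in one pass over the characters.
import Mathlib
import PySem

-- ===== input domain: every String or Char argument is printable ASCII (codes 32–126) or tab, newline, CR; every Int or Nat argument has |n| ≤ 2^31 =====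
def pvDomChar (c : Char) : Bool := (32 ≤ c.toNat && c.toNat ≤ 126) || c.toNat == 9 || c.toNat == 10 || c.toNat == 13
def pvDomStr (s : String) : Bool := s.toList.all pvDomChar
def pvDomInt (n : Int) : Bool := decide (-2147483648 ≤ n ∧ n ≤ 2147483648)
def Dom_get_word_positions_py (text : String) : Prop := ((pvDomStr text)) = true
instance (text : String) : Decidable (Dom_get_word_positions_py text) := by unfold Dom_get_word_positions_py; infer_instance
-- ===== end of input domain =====

-- B replaces A's split()-then-find() rescanning with one index-based scan emitting each word and its span (simpler, one pass).

-- ===== PORT A =====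
-- A: words = text.split(); then for each word, start = text.find(word, pos); append (start, start+len(word)); pos = start+len(word)
def get_word_positions_py (text : String) : List String × (List (Int × Int)) :=
  let words := PySem.Str.split₀ text
  let st := words.foldl (fun (st : List (Int × Int) × Int) word =>
    let start := PySem.Str.findFrom text word st.2
    (st.1 ++ [(start, start + PySem.Str.len word)], start + PySem.Str.len word)) ([], 0)
  (words, st.1)

-- ===== PORT B =====
-- B: single scan over the characters with a running index i: skip whitespace; otherwise the word is
-- the non-space run starting at i (the inner while / text[start:i] slice = takeWhile/dropWhile).
def pvNonspace (c : Char) : Bool := !PySem.Chars.isspace c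

def pvScan : List Char → Nat → List String × List (Int × Int)
  | [], _ => ([], [])
  | c :: rest, i =>
    if PySem.Chars.isspace c then pvScan rest (i + 1)
    else
      let w := List.takeWhile pvNonspace (c :: rest)
      let r := pvScan (List.dropWhile pvNonspace (c :: rest)) (i + w.length)
      (String.ofList w :: r.1, ((i : Int), (i : Int) + w.length) :: r.2)
termination_by s _ => s.length
decreasing_by
  · simp
  · have h1 : pvNonspace c = true := by simp [pvNonspace, *]
    have h2 := List.length_dropWhile_le pvNonspace rest
    simp [h1]
    omega

def get_word_positions_py_alt (text : String) : List String × (List (Int × Int)) :=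
  pvScan text.toList 0

-- ===== PRECONDITION & SPEC =====
def Spec_get_word_positions_py (text : String) (out : List String × (List (Int × Int))) : Prop := out = get_word_positions_py_alt text
instance (text : String) (out : List String × (List (Int × Int))) : Decidable (Spec_get_word_positions_py text out) := by unfold Spec_get_word_positions_py; infer_instance

-- ===== CLAIM (what is proved, stated in full; the proofs are below) =====
def Claim_equal_get_word_positions_py : Prop := ∀ (text : String), Dom_get_word_positions_py text → Spec_get_word_positions_py text (get_word_positions_py text)

-- ===== LEMMAS AND PROOFS =====

-- A's loop body, on the char-list side (the Str-level fold reduces to this).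
def pvStepA (text : List Char) (st : List (Int × Int) × Int) (w : List Char) : List (Int × Int) × Int :=
  let start := PySem.Chars.findFrom text w st.2
  (st.1 ++ [(start, start + (w.length : Int))], start + (w.length : Int))

-- structural facts about PySem.Chars.split₀ ------------------------------------------------

lemma pv_go_acc (s : List Char) : ∀ cur acc, PySem.Chars.split₀.go s cur acc = acc.reverse ++ PySem.Chars.split₀.go s cur [] := by
  induction s with
  | nil =>
    intro cur acc
    by_cases h : cur.isEmpty <;> simp [PySem.Chars.split₀.go, h]
  | cons c rest ih =>
    intro cur acc
    by_cases h : PySem.Chars.isspace c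
    · by_cases h2 : cur.isEmpty
      · simp only [PySem.Chars.split₀.go, h, h2, if_true]
        exact ih [] acc
      · simp only [PySem.Chars.split₀.go, h, h2, if_true, Bool.false_eq_true, ite_false]
        rw [ih [] (cur.reverse :: acc), ih [] [cur.reverse]]
        simp
    · simp only [PySem.Chars.split₀.go, h, Bool.false_eq_true, ite_false]
      rw [ih]

lemma pv_go_word (w : List Char) (hw : ∀ c ∈ w, pvNonspace c = true) :
    ∀ t cur acc, PySem.Chars.split₀.go (w ++ t) cur acc = PySem.Chars.split₀.go t (w.reverse ++ cur) acc := by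
  induction w with
  | nil => intro t cur acc; simp
  | cons c w' ih =>
    intro t cur acc
    have hc : PySem.Chars.isspace c = false := by
      have := hw c (by simp); simpa [pvNonspace] using this
    simp only [List.cons_append, PySem.Chars.split₀.go, hc, Bool.false_eq_true, ite_false]
    rw [ih (fun d hd => hw d (by simp [hd])) t (c :: cur) acc]
    simp

lemma pv_split0_nil : PySem.Chars.split₀ [] = [] := rfl

lemma pv_split0_space (c : Char) (s : List Char) (h : PySem.Chars.isspace c = true) :
    PySem.Chars.split₀ (c :: s) = PySem.Chars.split₀ s := by
  simp [PySem.Chars.split₀, PySem.Chars.split₀.go, h]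

lemma pv_split0_word (c : Char) (s : List Char) (h : PySem.Chars.isspace c = false) :
    PySem.Chars.split₀ (c :: s)
      = List.takeWhile pvNonspace (c :: s) :: PySem.Chars.split₀ (List.dropWhile pvNonspace (c :: s)) := by
  have hsplit : (c :: s) = List.takeWhile pvNonspace (c :: s) ++ List.dropWhile pvNonspace (c :: s) :=
    (List.takeWhile_append_dropWhile (p := pvNonspace) (l := c :: s)).symm
  have hwall : ∀ d ∈ List.takeWhile pvNonspace (c :: s), pvNonspace d = true :=
    fun d hd => List.mem_takeWhile_imp hd
  have hcw : List.takeWhile pvNonspace (c :: s) = c :: List.takeWhile pvNonspace s := by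
    simp [pvNonspace, h]
  conv_lhs => rw [PySem.Chars.split₀, hsplit]
  rw [pv_go_word _ hwall]
  cases ht : List.dropWhile pvNonspace (c :: s) with
  | nil =>
    rw [PySem.Chars.split₀.go]
    simp [hcw, pv_split0_nil]
  | cons d t' =>
    have hd : PySem.Chars.isspace d = true := by
      have := List.head_dropWhile_not pvNonspace (l := c :: s) (by simp [ht])
      simp [ht, pvNonspace] at this
      exact this
    have hne : ((List.takeWhile pvNonspace (c :: s)).reverse ++ []).isEmpty = false := by
      simp [hcw]
    rw [PySem.Chars.split₀.go]
    simp only [hd, if_true, hne, Bool.false_eq_true, ite_false]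
    rw [pv_go_acc]
    have : PySem.Chars.split₀.go (d :: t') ([] : List Char) ([] : List (List Char)) = PySem.Chars.split₀.go t' [] [] := pv_split0_space d t' hd
    simp [PySem.Chars.split₀, this]

-- the dropWhile suffix is a drop
lemma pv_dropWhile_eq_drop (l : List Char) : l.dropWhile pvNonspace = l.drop (l.takeWhile pvNonspace).length := by
  induction l with
  | nil => simp
  | cons a l ih => by_cases h : pvNonspace a <;> simp [h, ih]

-- first components: B's words are exactly split₀, rendered as Strings (independent of i)
lemma pv_scan_fst (s : List Char) (i : Nat) :
    (pvScan s i).1 = (PySem.Chars.split₀ s).map String.ofList := by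
  induction s, i using pvScan.induct with
  | case1 i => simp [pvScan, pv_split0_nil]
  | case2 c rest i h ih =>
    rw [pvScan]
    simp [h, pv_split0_space c rest h, ih]
  | case3 c rest i h w ih =>
    rw [pvScan]
    simp only [h, Bool.false_eq_true, ite_false]
    have h' : PySem.Chars.isspace c = false := by simpa using h
    simp only [pv_split0_word c rest h', List.map_cons, List.cons.injEq]
    exact ⟨trivial, ih⟩

-- text.find(word, p) lands exactly at the end of the whitespace gap
lemma pv_findFrom_gap (text : List Char) (p g : Nat) (c : Char) (w' t : List Char)
    (hd : text.drop (p + g) = (c :: w') ++ t)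
    (hc : PySem.Chars.isspace c = false)
    (hgap : ∀ j (hj : j < text.length), p ≤ j → j < p + g → PySem.Chars.isspace text[j] = true) :
    PySem.Chars.findFrom text (c :: w') (p : Int) = ((p + g : Nat) : Int) := by
  have hlt : p + g < text.length := by
    by_contra hcontra
    have : text.drop (p + g) = [] := List.drop_eq_nil_of_le (by omega)
    simp [this] at hd
  have hple : p ≤ text.length := by omega
  rw [PySem.Chars.findFrom_natCast text (c :: w') p hple]
  -- the word is a prefix of text.drop p at offset g
  have hpre_g : (c :: w') <+: (text.drop p).drop g := by
    rw [List.drop_drop]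
    rw [hd]
    exact List.prefix_append _ _
  -- no prefix strictly inside the gap
  have hnopre : ∀ i, i < g → ¬ (c :: w') <+: (text.drop p).drop i := by
    intro i hi hpre
    rw [List.drop_drop] at hpre
    have hj : p + i < text.length := by omega
    have hsp : PySem.Chars.isspace text[p + i] = true := hgap (p + i) hj (by omega) (by omega)
    obtain ⟨t2, ht2⟩ := hpre
    have : text[p + i]? = some c := by
      have := congrArg (fun l => l[0]?) ht2.symm
      simpa [List.getElem?_drop] using this
    have : text[p + i] = c := by
      have h0 := List.getElem?_eq_getElem hj
      rw [h0] at this; exact (Option.some_inj.mp this)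
    rw [this, hc] at hsp; exact Bool.false_ne_true hsp
  have hinfix : (c :: w') <:+: text.drop p :=
    List.infix_iff_prefix_suffix.mpr ⟨(text.drop p).drop g, hpre_g, List.drop_suffix _ _⟩
  have hnonneg : 0 ≤ PySem.Chars.find (text.drop p) (c :: w') :=
    (PySem.Chars.find_nonneg_iff _ _).mpr hinfix
  obtain ⟨hfp, hmin⟩ := PySem.Chars.find_spec hnonneg
  have hne : PySem.Chars.find (text.drop p) (c :: w') ≠ -1 := by omega
  have hkg : (PySem.Chars.find (text.drop p) (c :: w')).toNat = g := by
    by_contra hk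
    rcases Nat.lt_or_ge (PySem.Chars.find (text.drop p) (c :: w')).toNat g with hlt2 | hge
    · exact hnopre _ hlt2 hfp
    · exact hmin g (by omega) hpre_g
  have : PySem.Chars.find (text.drop p) (c :: w') = (g : Int) := by omega
  rw [this]
  simp

-- main loop invariant: A's fold over split₀ of the tail equals B's scan positions
lemma pv_main (n : Nat) : ∀ (text : List Char) (p pos : Nat), text.length - pos ≤ n → p ≤ pos → pos ≤ text.length →
    (∀ j (hj : j < text.length), p ≤ j → j < pos → PySem.Chars.isspace text[j] = true) →
    ∀ acc : List (Int × Int),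
      ∃ fin, (PySem.Chars.split₀ (text.drop pos)).foldl (pvStepA text) (acc, (p : Int))
        = (acc ++ (pvScan (text.drop pos) pos).2, fin) := by
  induction n with
  | zero =>
    intro text p pos hn hp hpos hgap acc
    have hnil : text.drop pos = [] := List.drop_eq_nil_of_le (by omega)
    rw [hnil]
    exact ⟨(p : Int), by simp [pv_split0_nil, pvScan]⟩
  | succ n ih =>
    intro text p pos hn hp hpos hgap acc
    cases hs : text.drop pos with
    | nil => exact ⟨(p : Int), by simp [pv_split0_nil, pvScan]⟩
    | cons c rest =>
      have hlen : (text.drop pos).length = text.length - pos := List.length_drop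
      have hposlt : pos < text.length := by rw [hs] at hlen; simp at hlen; omega
      have hdrop1 : text.drop (pos + 1) = rest := by rw [← List.tail_drop, hs]; rfl
      by_cases hc : PySem.Chars.isspace c = true
      · -- leading whitespace: advance pos
        have hcpos : text[pos] = c := by
          have h0 := congrArg (fun l => l[0]?) hs
          simp only [List.getElem?_drop, Nat.add_zero] at h0
          rw [List.getElem?_eq_getElem hposlt] at h0
          exact Option.some_inj.mp h0
        have hgap' : ∀ j (hj : j < text.length), p ≤ j → j < pos + 1 → PySem.Chars.isspace text[j] = true := by
          intro j hj h1 h2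
          by_cases hje : j = pos
          · subst hje; rw [hcpos]; exact hc
          · exact hgap j hj h1 (by omega)
        obtain ⟨fin, hfin⟩ := ih text p (pos + 1) (by omega) (by omega) (by omega) hgap' acc
        refine ⟨fin, ?_⟩
        have hscan : pvScan (c :: rest) pos = pvScan (text.drop (pos + 1)) (pos + 1) := by
          rw [hdrop1, pvScan, if_pos hc]
        rw [pv_split0_space c rest hc, hscan, ← hdrop1, hfin, hdrop1]
      · -- a word starts at pos
        have hc' : PySem.Chars.isspace c = false := by simpa using hc
        have hsplit : (c :: rest) = List.takeWhile pvNonspace (c :: rest) ++ List.dropWhile pvNonspace (c :: rest) :=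
          (List.takeWhile_append_dropWhile (p := pvNonspace) (l := c :: rest)).symm
        have hw : List.takeWhile pvNonspace (c :: rest) = c :: List.takeWhile pvNonspace rest := by
          simp [pvNonspace, hc']
        set w := List.takeWhile pvNonspace (c :: rest) with hwdef
        set t := List.dropWhile pvNonspace (c :: rest) with htdef
        have hppg : p + (pos - p) = pos := by omega
        have hd : text.drop (p + (pos - p)) = (c :: List.takeWhile pvNonspace rest) ++ t := by
          rw [hppg, hs]; rw [← hw]; exact hsplit
        have hfind : PySem.Chars.findFrom text w (p : Int) =
            ((pos : Nat) : Int) := by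
          rw [hw]
          rw [pv_findFrom_gap text p (pos - p) c (List.takeWhile pvNonspace rest) t hd hc'
            (fun j hj h1 h2 => hgap j hj h1 (by omega))]
          omega
        have hwlen : w.length ≥ 1 := by rw [hw]; simp
        have hwlen_le : pos + w.length ≤ text.length := by
          have : w.length ≤ (c :: rest).length := by
            conv_rhs => rw [hsplit]
            simp
          rw [hs] at hlen
          omega
        have ht : t = text.drop (pos + w.length) := by
          rw [htdef, pv_dropWhile_eq_drop, ← hwdef, ← hs, List.drop_drop]
        obtain ⟨fin, hfin⟩ := ih text (pos + w.length) (pos + w.length)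
          (by rw [hs] at hlen; omega) le_rfl hwlen_le (by omega)
          (acc ++ [((pos : Int), ((pos + w.length : Nat) : Int))])
        refine ⟨fin, ?_⟩
        rw [pv_split0_word c rest hc', List.foldl_cons]
        have hstep : pvStepA text (acc, (p : Int)) w
            = (acc ++ [((pos : Int), ((pos + w.length : Nat) : Int))], ((pos + w.length : Nat) : Int)) := by
          simp only [pvStepA, hfind]
          push_cast
          rfl
        rw [hstep]
        rw [← ht] at hfin
        rw [hfin]
        have hscan : pvScan (c :: rest) pos
            = (String.ofList w :: (pvScan t (pos + w.length)).1,
               ((pos : Int), (pos : Int) + w.length) :: (pvScan t (pos + w.length)).2) := by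
          rw [pvScan, if_neg hc]
        rw [hscan]
        simp only [List.append_assoc, List.singleton_append]
        push_cast
        rfl

-- ===== VERDICT (by name: the statement is the Claim_ definition above) =====
theorem get_word_positions_py_spec : Claim_equal_get_word_positions_py := by
  intro text _
  unfold Spec_get_word_positions_py get_word_positions_py get_word_positions_py_alt
  have hsplit : PySem.Str.split₀ text = (PySem.Chars.split₀ text.toList).map String.ofList := rfl
  obtain ⟨fin, hfin⟩ := pv_main text.toList.length text.toList 0 0 (by omega) le_rfl (by omega)
    (by omega) []
  simp only [List.drop_zero, List.nil_append] at hfin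
  have hfold : (PySem.Str.split₀ text).foldl (fun (st : List (Int × Int) × Int) word =>
        (st.1 ++ [(PySem.Str.findFrom text word st.2, PySem.Str.findFrom text word st.2 + PySem.Str.len word)],
         PySem.Str.findFrom text word st.2 + PySem.Str.len word)) ([], (0 : Int))
      = (PySem.Chars.split₀ text.toList).foldl (pvStepA text.toList) ([], ((0 : Nat) : Int)) := by
    rw [hsplit, List.foldl_map]
    congr 1
    funext st w
    simp [pvStepA, PySem.Str.findFrom, PySem.Str.len]
  refine Prod.ext ?_ ?_
  · simpa [hsplit] using (pv_scan_fst text.toList 0).symm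
  · show ((PySem.Str.split₀ text).foldl _ ([], (0 : Int))).1 = (pvScan text.toList 0).2
    rw [hfold, hfin]
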